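-- pv_equiv track=rewrite | github.com/MarkSon-42/Team_ALGO | hyungjoon/프로그래머스/레벨 2/230901_프로그래머스_86971_전력망을 둘로 나누기/solved(bfs).py | bfs
-- ===== SOURCE A (Python) =====
-- from collections import deque
--
-- def bfs(start, graph, visited, isCut):
--     cnt = 1
--     visited[start] = True
--
--     q = deque([start])
--     while q:
--         v = q.popleft()
--
--         for i in graph[v]:
--             if not isCut[v][i] and not visited[i]:
--                 q.append(i)
--                 visited[i] = True
--                 cnt += 1
--     return cnt
-- ===== SOURCE B (Python) =====
-- def bfs(start, graph, visited, isCut):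
--     # Fixpoint saturation instead of a queue: repeatedly rescan the component
--     # snapshot until a round adds nothing; mutates `visited` like the original.
--     visited[start] = True
--     comp = [start]
--     changed = True
--     while changed:
--         changed = False
--         for v in list(comp):
--             for i in graph[v]:
--                 if not isCut[v][i] and not visited[i]:
--                     visited[i] = True
--                     comp.append(i)
--                     changed = True
--     return len(comp)
-- ===== Notes on version B (the rewrite author's own statement) =====
-- stated objective: alternative
-- what changed: Replaces the deque-based one-node-at-a-time BFS by round-based fixpoint saturation: repeatedly rescan a snapshot of the whole component list, marking new neighbours, until a full round adds nothing, and return the component list's length instead of an incremented counter.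
-- outside the precondition, e.g. on bfs(-1, {-1: []}, [False], {}): A returns 1, B returns 1
import Mathlib
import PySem

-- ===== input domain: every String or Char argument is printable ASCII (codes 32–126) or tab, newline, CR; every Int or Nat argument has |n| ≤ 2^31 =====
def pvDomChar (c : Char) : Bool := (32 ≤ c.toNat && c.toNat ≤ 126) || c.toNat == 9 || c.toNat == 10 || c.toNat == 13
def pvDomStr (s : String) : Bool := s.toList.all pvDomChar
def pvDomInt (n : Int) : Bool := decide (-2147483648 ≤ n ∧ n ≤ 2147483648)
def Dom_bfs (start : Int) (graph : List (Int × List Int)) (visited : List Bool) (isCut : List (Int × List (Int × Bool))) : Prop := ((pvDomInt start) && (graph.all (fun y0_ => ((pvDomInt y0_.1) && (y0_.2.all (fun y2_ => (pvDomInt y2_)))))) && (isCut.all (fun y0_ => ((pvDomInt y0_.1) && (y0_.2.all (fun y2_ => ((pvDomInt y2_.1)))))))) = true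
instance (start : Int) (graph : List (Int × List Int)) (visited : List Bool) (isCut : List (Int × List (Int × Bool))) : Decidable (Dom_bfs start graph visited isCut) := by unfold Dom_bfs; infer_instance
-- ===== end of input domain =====

-- B replaces A's deque-based one-node-at-a-time BFS by round-based fixpoint saturation
-- (rescan a snapshot of the whole component list until a round marks nothing, return its length);
-- both mutate `visited` in place in Python identically — the equivalence proved here is about the return value.

-- ===== PORT A =====
-- one neighbour i of v: `if not isCut[v][i] and not visited[i]: q.append(i); visited[i] = True; cnt += 1`
-- (a `none` from a lookup is where the Python raises; outside Pre_ the port just keeps the state)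
def pvVisitA (isCut : List (Int × List (Int × Bool))) (v : Int)
    (st : List Bool × List Int × Int) (i : Int) : List Bool × List Int × Int :=
  match List.lookup v isCut with
  | none => st
  | some d =>
    match List.lookup i d with
    | none => st
    | some cut =>
      if cut then st
      else
        match PySem.List.pyGet? st.1 i with
        | some false => (PySem.List.pySetD st.1 i true, st.2.1 ++ [i], st.2.2 + 1)
        | _ => st

-- the `while q:` loop; fuel is a totality guard only (each enqueue marks a fresh cell, so
-- `visited.length + 1` iterations always suffice; on a Python exception the port returns junk)
def pvALoop (graph : List (Int × List Int)) (isCut : List (Int × List (Int × Bool))) :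
    Nat → List Bool → List Int → Int → Int
  | 0, _, _, cnt => cnt
  | _ + 1, _, [], cnt => cnt
  | f + 1, vis, v :: rest, cnt =>
    match List.lookup v graph with
    | none => cnt
    | some ns =>
      let st := ns.foldl (pvVisitA isCut v) (vis, ([] : List Int), cnt)
      pvALoop graph isCut f st.1 (rest ++ st.2.1) st.2.2

def bfs (start : Int) (graph : List (Int × List Int)) (visited : List Bool) (isCut : List (Int × List (Int × Bool))) : Int :=
  match PySem.List.pySet? visited start true with
  | none => 0   -- IndexError on visited[start] = True
  | some vis => pvALoop graph isCut (visited.length + 1) vis [start] 1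

-- ===== PORT B =====
-- `for i in graph[v]: if not isCut[v][i] and not visited[i]: visited[i]=True; comp.append(i); changed=True`
-- (a `none` from a lookup / index is where the Python raises; the port then stops with the state)
def pvScanNbrs (isCut : List (Int × List (Int × Bool))) (v : Int)
    (vis : List Bool) (comp : List Int) (changed : Bool) :
    List Int → List Bool × List Int × Bool
  | [] => (vis, comp, changed)
  | i :: rest =>
    match List.lookup v isCut with
    | none => (vis, comp, changed)
    | some d =>
      match List.lookup i d with
      | none => (vis, comp, changed)
      | some cut =>
        if cut then pvScanNbrs isCut v vis comp changed rest
        else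
          match PySem.List.pyGet? vis i with
          | some false => pvScanNbrs isCut v (PySem.List.pySetD vis i true) (comp ++ [i]) true rest
          | some true => pvScanNbrs isCut v vis comp changed rest
          | none => (vis, comp, changed)

-- `for v in list(comp): …` — one scan of the snapshot of the component list
def pvScanComp (graph : List (Int × List Int)) (isCut : List (Int × List (Int × Bool)))
    (vis : List Bool) (comp : List Int) (changed : Bool) :
    List Int → List Bool × List Int × Bool
  | [] => (vis, comp, changed)
  | v :: rest =>
    match List.lookup v graph with
    | none => (vis, comp, changed)
    | some ns =>
      let st := pvScanNbrs isCut v vis comp changed ns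
      pvScanComp graph isCut st.1 st.2.1 st.2.2 rest

-- the `while changed:` loop; fuel is a totality guard only (each productive round marks ≥ 1 cell)
def pvBLoop (graph : List (Int × List Int)) (isCut : List (Int × List (Int × Bool))) :
    Nat → List Bool → List Int → Int
  | 0, _, comp => (comp.length : Int)
  | f + 1, vis, comp =>
    let st := pvScanComp graph isCut vis comp false comp
    if st.2.2 then pvBLoop graph isCut f st.1 st.2.1 else ((st.2.1).length : Int)

def bfs_alt (start : Int) (graph : List (Int × List Int)) (visited : List Bool) (isCut : List (Int × List (Int × Bool))) : Int :=
  match PySem.List.pySet? visited start true with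
  | none => 0
  | some vis => pvBLoop graph isCut (visited.length + 1) vis [start]

-- ===== PRECONDITION & SPEC =====
-- one expansion round of the reachable set: add every in-range endpoint of a non-cut edge
def pvGrow (graph : List (Int × List Int)) (isCut : List (Int × List (Int × Bool))) (n : Nat)
    (S : List Int) : List Int :=
  S.foldl (fun acc u =>
    ((List.lookup u graph).getD []).foldl (fun acc2 i =>
      if List.lookup i ((List.lookup u isCut).getD []) = some false ∧
          0 ≤ i ∧ i < (n : Int) ∧ i ∉ acc2
      then acc2 ++ [i] else acc2) acc) S

-- the nodes reachable from start along non-cut in-range edges (n+1 rounds saturate)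
def pvReach (graph : List (Int × List Int)) (isCut : List (Int × List (Int × Bool))) (n : Nat)
    (start : Int) : List Int :=
  (pvGrow graph isCut n)^[n + 1] [start]

-- Pre_ says: start is a valid nonnegative index of `visited` and every node reachable from it
-- along non-cut in-range edges has a graph entry and isCut entries for all its neighbours —
-- the dictionary entries A dereferences. It is slightly stronger than A's exact domain: it also
-- excludes a negative start (A then mixes wraparound indexing with negative dict keys) and
-- inputs whose malformed region is cut off only by initially visited nodes.
def Pre_bfs (start : Int) (graph : List (Int × List Int)) (visited : List Bool) (isCut : List (Int × List (Int × Bool))) : Prop :=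
  0 ≤ start ∧ start < (visited.length : Int) ∧
  ∀ v ∈ pvReach graph isCut visited.length start,
    (List.lookup v graph).isSome = true ∧
    ∀ i ∈ (List.lookup v graph).getD [],
      (List.lookup i ((List.lookup v isCut).getD [])).isSome = true ∧
      (List.lookup i ((List.lookup v isCut).getD []) = some false →
        0 ≤ i ∧ i < (visited.length : Int))
instance (start : Int) (graph : List (Int × List Int)) (visited : List Bool) (isCut : List (Int × List (Int × Bool))) : Decidable (Pre_bfs start graph visited isCut) := by unfold Pre_bfs; infer_instance

def pvWitness_bfs : Int × (List (Int × List Int)) × List Bool × (List (Int × List (Int × Bool))) :=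
  (0, [(0, [1]), (1, [0])], [false, false], [(0, [(1, false)]), (1, [(0, false)])])

def Spec_bfs (start : Int) (graph : List (Int × List Int)) (visited : List Bool) (isCut : List (Int × List (Int × Bool))) (out : Int) : Prop := out = bfs_alt start graph visited isCut
instance (start : Int) (graph : List (Int × List Int)) (visited : List Bool) (isCut : List (Int × List (Int × Bool))) (out : Int) : Decidable (Spec_bfs start graph visited isCut out) := by unfold Spec_bfs; infer_instance

-- ===== CLAIM (what is proved, stated in full; the proofs are below) =====
def Claim_equal_bfs : Prop := ∀ (start : Int) (graph : List (Int × List Int)) (visited : List Bool) (isCut : List (Int × List (Int × Bool))), Dom_bfs start graph visited isCut → Pre_bfs start graph visited isCut → Spec_bfs start graph visited isCut (bfs start graph visited isCut)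

-- ===== LEMMAS AND PROOFS =====

-- well-formedness of the input along a set R of nodes, as the loop lemmas consume it:
-- every node of R has its dictionary entries, and non-cut edges stay inside R
def pvOK (graph : List (Int × List Int)) (isCut : List (Int × List (Int × Bool))) (n : Nat)
    (R : List Int) : Prop :=
  ∀ v ∈ R, (List.lookup v graph).isSome = true ∧
    ∀ i ∈ (List.lookup v graph).getD [],
      (List.lookup i ((List.lookup v isCut).getD [])).isSome = true ∧
      (List.lookup i ((List.lookup v isCut).getD []) = some false →
        0 ≤ i ∧ i < (n : Int) ∧ i ∈ R)

-- `vis ≤ vis'` pointwise on true cells (marking never unmarks)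
def pvLe (vis vis' : List Bool) : Prop :=
  ∀ k : Nat, vis[k]? = some true → vis'[k]? = some true

-- v is saturated: every non-cut neighbour of v is already marked
def pvSat (graph : List (Int × List Int)) (isCut : List (Int × List (Int × Bool)))
    (vis : List Bool) (v : Int) : Prop :=
  ∀ i ∈ (List.lookup v graph).getD [],
    List.lookup i ((List.lookup v isCut).getD []) = some false →
    PySem.List.pyGet? vis i = some true

theorem pvLe_refl (vis : List Bool) : pvLe vis vis := fun _ h => h

theorem pvLe_trans {a b c : List Bool} (h1 : pvLe a b) (h2 : pvLe b c) : pvLe a c :=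
  fun k h => h2 k (h1 k h)

theorem pvLe_set (vis : List Bool) (m : Nat) : pvLe vis (vis.set m true) := by
  intro k h
  obtain ⟨hk, -⟩ := List.getElem?_eq_some_iff.mp h
  by_cases hm : m = k
  · subst hm; simp [List.getElem?_set, hk]
  · rw [List.getElem?_set_ne (by omega)]; exact h

theorem pvCountSetFalse (l : List Bool) (k : Nat) (h : k < l.length) (hv : l[k] = false) :
    (l.set k true).count false + 1 = l.count false := by
  have h2 := List.count_set (a := true) (b := false) (l := l) (i := k) h
  have h3 : 0 < l.count false := List.count_pos_iff.mpr (by rw [← hv]; exact List.getElem_mem h)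
  simp [hv] at h2; omega

-- ---- pvGrow / pvReach: the closure facts Pre_ feeds into pvOK ----

theorem pvGrowInner_suffix (isCut : List (Int × List (Int × Bool))) (n : Nat) (u : Int) :
    ∀ (ns : List Int) (acc : List Int), ∃ t, ns.foldl (fun acc2 i =>
      if List.lookup i ((List.lookup u isCut).getD []) = some false ∧
          0 ≤ i ∧ i < (n : Int) ∧ i ∉ acc2
      then acc2 ++ [i] else acc2) acc = acc ++ t := by
  intro ns
  induction ns with
  | nil => intro acc; exact ⟨[], by simp⟩
  | cons i rest ih =>
    intro acc
    simp only [List.foldl_cons]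
    by_cases h : List.lookup i ((List.lookup u isCut).getD []) = some false ∧
        0 ≤ i ∧ i < (n : Int) ∧ i ∉ acc
    · rw [if_pos h]
      obtain ⟨t, ht⟩ := ih (acc ++ [i])
      exact ⟨[i] ++ t, by rw [ht, List.append_assoc]⟩
    · rw [if_neg h]
      exact ih acc

theorem pvGrow_suffix (graph : List (Int × List Int)) (isCut : List (Int × List (Int × Bool)))
    (n : Nat) : ∀ (S acc : List Int), ∃ t, S.foldl (fun acc u =>
      ((List.lookup u graph).getD []).foldl (fun acc2 i =>
        if List.lookup i ((List.lookup u isCut).getD []) = some false ∧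
            0 ≤ i ∧ i < (n : Int) ∧ i ∉ acc2
        then acc2 ++ [i] else acc2) acc) acc = acc ++ t := by
  intro S
  induction S with
  | nil => intro acc; exact ⟨[], by simp⟩
  | cons u rest ih =>
    intro acc
    simp only [List.foldl_cons]
    obtain ⟨t1, ht1⟩ := pvGrowInner_suffix isCut n u ((List.lookup u graph).getD []) acc
    rw [ht1]
    obtain ⟨t2, ht2⟩ := ih (acc ++ t1)
    exact ⟨t1 ++ t2, by rw [ht2, List.append_assoc]⟩

theorem pvGrow_mono (graph : List (Int × List Int)) (isCut : List (Int × List (Int × Bool)))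
    (n : Nat) (S : List Int) : ∃ t, pvGrow graph isCut n S = S ++ t := by
  exact pvGrow_suffix graph isCut n S S

theorem pvGrowInner_mem (isCut : List (Int × List (Int × Bool))) (n : Nat) (u i : Int)
    (hcut : List.lookup i ((List.lookup u isCut).getD []) = some false)
    (h0 : 0 ≤ i) (h1 : i < (n : Int)) :
    ∀ (ns : List Int) (acc : List Int), i ∈ ns → i ∈ ns.foldl (fun acc2 j =>
      if List.lookup j ((List.lookup u isCut).getD []) = some false ∧
          0 ≤ j ∧ j < (n : Int) ∧ j ∉ acc2
      then acc2 ++ [j] else acc2) acc := by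
  intro ns
  induction ns with
  | nil => intro acc h; simp at h
  | cons j rest ih =>
    intro acc hmem
    simp only [List.foldl_cons]
    rcases List.mem_cons.mp hmem with h | h
    · subst h
      by_cases hin : i ∈ acc
      · by_cases hc : List.lookup i ((List.lookup u isCut).getD []) = some false ∧
            0 ≤ i ∧ i < (n : Int) ∧ i ∉ acc
        · exact absurd hin hc.2.2.2
        · rw [if_neg hc]
          obtain ⟨t, ht⟩ := pvGrowInner_suffix isCut n u rest acc
          rw [ht]; exact List.mem_append_left _ hin
      · rw [if_pos ⟨hcut, h0, h1, hin⟩]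
        obtain ⟨t, ht⟩ := pvGrowInner_suffix isCut n u rest (acc ++ [i])
        rw [ht]
        exact List.mem_append_left _ (List.mem_append_right _ (List.mem_singleton.mpr rfl))
    · exact ih _ h

theorem pvGrow_mem (graph : List (Int × List Int)) (isCut : List (Int × List (Int × Bool)))
    (n : Nat) (u i : Int) (hiu : i ∈ (List.lookup u graph).getD [])
    (hcut : List.lookup i ((List.lookup u isCut).getD []) = some false)
    (h0 : 0 ≤ i) (h1 : i < (n : Int)) :
    ∀ (S acc : List Int), u ∈ S → i ∈ S.foldl (fun acc u =>
      ((List.lookup u graph).getD []).foldl (fun acc2 j =>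
        if List.lookup j ((List.lookup u isCut).getD []) = some false ∧
            0 ≤ j ∧ j < (n : Int) ∧ j ∉ acc2
        then acc2 ++ [j] else acc2) acc) acc := by
  intro S
  induction S with
  | nil => intro acc h; simp at h
  | cons w rest ih =>
    intro acc hmem
    simp only [List.foldl_cons]
    rcases List.mem_cons.mp hmem with h | h
    · subst h
      have hstep := pvGrowInner_mem isCut n u i hcut h0 h1 ((List.lookup u graph).getD []) acc hiu
      obtain ⟨t, ht⟩ := pvGrow_suffix graph isCut n rest
        (((List.lookup u graph).getD []).foldl _ acc)
      rw [ht]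
      exact List.mem_append_left _ hstep
    · exact ih _ h

-- elements of the iterates: nodup, and bounded by {start} ∪ [0, n)
def pvElems (n : Nat) (start : Int) (S : List Int) : Prop :=
  S.Nodup ∧ ∀ x ∈ S, x = start ∨ (0 ≤ x ∧ x < (n : Int))

theorem pvGrowInner_elems (isCut : List (Int × List (Int × Bool))) (n : Nat) (start u : Int) :
    ∀ (ns acc : List Int), pvElems n start acc → pvElems n start (ns.foldl (fun acc2 i =>
      if List.lookup i ((List.lookup u isCut).getD []) = some false ∧
          0 ≤ i ∧ i < (n : Int) ∧ i ∉ acc2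
      then acc2 ++ [i] else acc2) acc) := by
  intro ns
  induction ns with
  | nil => intro acc h; exact h
  | cons i rest ih =>
    intro acc hacc
    simp only [List.foldl_cons]
    by_cases hc : List.lookup i ((List.lookup u isCut).getD []) = some false ∧
        0 ≤ i ∧ i < (n : Int) ∧ i ∉ acc
    · rw [if_pos hc]
      refine ih _ ⟨?_, ?_⟩
      · simpa [List.nodup_append] using
          ⟨hacc.1, fun a ha (h : a = i) => hc.2.2.2 (h ▸ ha)⟩
      · intro x hx
        rcases List.mem_append.mp hx with h | h
        · exact hacc.2 x h
        · simp at h; subst h; exact Or.inr ⟨hc.2.1, hc.2.2.1⟩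
    · rw [if_neg hc]; exact ih _ hacc

theorem pvGrow_elems (graph : List (Int × List Int)) (isCut : List (Int × List (Int × Bool)))
    (n : Nat) (start : Int) :
    ∀ (S acc : List Int), pvElems n start acc → pvElems n start (S.foldl (fun acc u =>
      ((List.lookup u graph).getD []).foldl (fun acc2 i =>
        if List.lookup i ((List.lookup u isCut).getD []) = some false ∧
            0 ≤ i ∧ i < (n : Int) ∧ i ∉ acc2
        then acc2 ++ [i] else acc2) acc) acc) := by
  intro S
  induction S with
  | nil => intro acc h; exact h
  | cons u rest ih =>
    intro acc hacc
    simp only [List.foldl_cons]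
    exact ih _ (pvGrowInner_elems isCut n start u _ acc hacc)

theorem pvElems_length (n : Nat) (start : Int) (S : List Int) (h : pvElems n start S) :
    S.length ≤ n + 1 := by
  classical
  have hsub : S.toFinset ⊆ insert start (Finset.image (fun k : Nat => (k : Int)) (Finset.range n)) := by
    intro x hx
    rcases h.2 x (List.mem_toFinset.mp hx) with h1 | h1
    · subst h1; exact Finset.mem_insert_self ..
    · obtain ⟨hx0, hx1⟩ := h1
      apply Finset.mem_insert_of_mem
      rw [Finset.mem_image]
      refine ⟨x.toNat, Finset.mem_range.mpr ?_, ?_⟩ <;> omega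
  have h1 : S.length = S.toFinset.card := (List.toFinset_card_of_nodup h.1).symm
  have h3 : (Finset.image (fun k : Nat => (k : Int)) (Finset.range n)).card ≤ n := by
    calc (Finset.image (fun k : Nat => (k : Int)) (Finset.range n)).card
        ≤ (Finset.range n).card := Finset.card_image_le
      _ = n := Finset.card_range n
  have h4 := Finset.card_insert_le start (Finset.image (fun k : Nat => (k : Int)) (Finset.range n))
  have h5 := Finset.card_le_card hsub
  omega

theorem pvIter_const {α : Type} (f : α → α) (s : α) (k : Nat) (h : f (f^[k] s) = f^[k] s) :
    ∀ m, k ≤ m → f^[m] s = f^[k] s := by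
  intro m hkm
  induction m with
  | zero => cases Nat.le_zero.mp hkm; rfl
  | succ m ih =>
    rcases Nat.lt_or_ge k (m + 1) with hlt | hge
    · have hm := ih (by omega)
      rw [Function.iterate_succ_apply' f m s, hm, h]
    · have : k = m + 1 := by omega
      subst this; rfl

theorem pvReach_fix (graph : List (Int × List Int)) (isCut : List (Int × List (Int × Bool)))
    (n : Nat) (start : Int) :
    pvGrow graph isCut n (pvReach graph isCut n start) = pvReach graph isCut n start := by
  by_contra hne
  have hne' : pvGrow graph isCut n ((pvGrow graph isCut n)^[n + 1] [start]) ≠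
      (pvGrow graph isCut n)^[n + 1] [start] := by
    simpa [pvReach] using hne
  have hstrict : ∀ k, k ≤ n + 1 → pvGrow graph isCut n ((pvGrow graph isCut n)^[k] [start]) ≠
      (pvGrow graph isCut n)^[k] [start] := by
    intro k hk heq
    have hconst := pvIter_const (pvGrow graph isCut n) [start] k heq (n + 1) hk
    exact hne' (by rw [hconst]; exact heq)
  have hgrow : ∀ k, k ≤ n + 1 → k + 1 ≤ ((pvGrow graph isCut n)^[k] [start]).length := by
    intro k
    induction k with
    | zero => intro _; simp
    | succ k ih =>
      intro hk
      have hlen := ih (by omega)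
      obtain ⟨t, ht⟩ := pvGrow_mono graph isCut n ((pvGrow graph isCut n)^[k] [start])
      have htne : t ≠ [] := by
        intro h; rw [h, List.append_nil] at ht; exact hstrict k (by omega) ht
      have h1 : 1 ≤ t.length := List.length_pos_iff.mpr htne
      rw [Function.iterate_succ_apply' (pvGrow graph isCut n) k [start], ht, List.length_append]
      omega
  have helems : ∀ k, pvElems n start ((pvGrow graph isCut n)^[k] [start]) := by
    intro k
    induction k with
    | zero => exact ⟨List.nodup_singleton _, by intro x hx; simp at hx; exact Or.inl hx⟩
    | succ k ih =>
      rw [Function.iterate_succ_apply' (pvGrow graph isCut n) k [start]]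
      exact pvGrow_elems graph isCut n start _ _ ih
  have hcap := pvElems_length n start _ (helems (n + 1))
  have hlen2 := hgrow (n + 1) (by omega)
  omega

theorem pvStart_mem_reach (graph : List (Int × List Int)) (isCut : List (Int × List (Int × Bool)))
    (n : Nat) (start : Int) : start ∈ pvReach graph isCut n start := by
  have : ∀ k, start ∈ (pvGrow graph isCut n)^[k] [start] := by
    intro k
    induction k with
    | zero => simp
    | succ k ih =>
      rw [Function.iterate_succ_apply']
      obtain ⟨t, ht⟩ := pvGrow_mono graph isCut n ((pvGrow graph isCut n)^[k] [start])
      rw [ht]; exact List.mem_append_left _ ih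
  exact this (n + 1)

theorem pvPre_OK (start : Int) (graph : List (Int × List Int)) (visited : List Bool)
    (isCut : List (Int × List (Int × Bool))) (hPre : Pre_bfs start graph visited isCut) :
    pvOK graph isCut visited.length (pvReach graph isCut visited.length start) := by
  obtain ⟨h0, h1, hwf⟩ := hPre
  intro v hv
  obtain ⟨hkey, hedges⟩ := hwf v hv
  refine ⟨hkey, ?_⟩
  intro i hi
  obtain ⟨hsome, hbounds⟩ := hedges i hi
  refine ⟨hsome, ?_⟩
  intro hcut
  obtain ⟨hb0, hb1⟩ := hbounds hcut
  refine ⟨hb0, hb1, ?_⟩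
  have := pvGrow_mem graph isCut visited.length v i hi hcut hb0 hb1
    (pvReach graph isCut visited.length start) (pvReach graph isCut visited.length start) hv
  rw [← pvGrow] at this
  rw [← pvReach_fix graph isCut visited.length start]
  exact this

-- ---- saturation transfers along marking ----
theorem pvSat_mono (graph : List (Int × List Int)) (isCut : List (Int × List (Int × Bool)))
    (n : Nat) (R : List Int) (hOK : pvOK graph isCut n R) (v : Int) (hv : v ∈ R)
    {vis vis' : List Bool} (hle : pvLe vis vis') (hsat : pvSat graph isCut vis v) :
    pvSat graph isCut vis' v := by
  intro i hi hcut
  obtain ⟨_, hedges⟩ := hOK v hv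
  obtain ⟨hi0, _, _⟩ := (hedges i hi).2 hcut
  have h1 := hsat i hi hcut
  rw [PySem.List.pyGet?_of_nonneg _ hi0] at h1 ⊢
  exact hle i.toNat h1

-- ---- one node's neighbour scan: both ports flip exactly the fresh non-cut in-range
-- neighbours δ false → true, append them, and report them, whatever the accumulators ----
theorem pvExpand (isCut : List (Int × List (Int × Bool)))
    (n : Nat) (R : List Int) (v : Int) (ns : List Int)
    (H : ∀ i ∈ ns, (List.lookup i ((List.lookup v isCut).getD [])).isSome = true ∧
      (List.lookup i ((List.lookup v isCut).getD []) = some false →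
        0 ≤ i ∧ i < (n : Int) ∧ i ∈ R)) :
    ∀ (vis : List Bool), vis.length = n →
    ∃ vis' δ, (∀ (add : List Int) (cnt : Int),
        ns.foldl (pvVisitA isCut v) (vis, add, cnt) = (vis', add ++ δ, cnt + δ.length))
      ∧ (∀ (comp : List Int) (ch : Bool),
        pvScanNbrs isCut v vis comp ch ns = (vis', comp ++ δ, ch || !δ.isEmpty))
      ∧ vis'.length = n ∧ vis'.count false + δ.length = vis.count false ∧ (∀ i ∈ δ, i ∈ R)
      ∧ pvLe vis vis'
      ∧ (∀ i ∈ ns, List.lookup i ((List.lookup v isCut).getD []) = some false →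
          PySem.List.pyGet? vis' i = some true) := by
  induction ns with
  | nil =>
    intro vis hlen
    exact ⟨vis, [], by intro add cnt; simp, by intro comp ch; simp [pvScanNbrs],
      hlen, by simp, by simp, pvLe_refl vis, by simp⟩
  | cons i rest ih =>
    intro vis hlen
    have ihH : ∀ j ∈ rest, (List.lookup j ((List.lookup v isCut).getD [])).isSome = true ∧
        (List.lookup j ((List.lookup v isCut).getD []) = some false →
          0 ≤ j ∧ j < (n : Int) ∧ j ∈ R) := fun j hj => H j (List.mem_cons_of_mem _ hj)
    obtain ⟨hd, hcond⟩ := H i (List.mem_cons_self ..)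
    have hdsome : ∃ d, List.lookup v isCut = some d := by
      cases h : List.lookup v isCut with
      | none => rw [h] at hd; simp at hd
      | some d => exact ⟨d, rfl⟩
    obtain ⟨d, hd2⟩ := hdsome
    rw [hd2, Option.getD_some] at hd hcond
    obtain ⟨cut, hcut⟩ := Option.isSome_iff_exists.mp hd
    have hstepA : ∀ (add : List Int) (cnt : Int), pvVisitA isCut v (vis, add, cnt) i =
        (match PySem.List.pyGet? vis i with
          | some false => if cut then (vis, add, cnt)
              else (PySem.List.pySetD vis i true, add ++ [i], cnt + 1)
          | _ => (vis, add, cnt)) := by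
      intro add cnt
      simp only [pvVisitA, hd2, hcut]
      cases h : PySem.List.pyGet? vis i with
      | none => simp [h]
      | some b => cases b <;> cases cut <;> simp [h]
    cases cut with
    | true =>
      obtain ⟨vis', δ, hfA, hfB, hl, hcnt, hsub, hle, hsat⟩ := ih ihH vis hlen
      refine ⟨vis', δ, ?_, ?_, hl, hcnt, hsub, hle, ?_⟩
      · intro add cnt
        simp only [List.foldl_cons, hstepA]
        cases h : PySem.List.pyGet? vis i with
        | none => exact hfA add cnt
        | some b => cases b <;> simpa using hfA add cnt
      · intro comp ch
        simp only [pvScanNbrs, hd2, hcut, if_pos]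
        exact hfB comp ch
      · intro j hj hjcut
        rcases List.mem_cons.mp hj with h | h
        · subst h; rw [hd2, Option.getD_some, hcut] at hjcut; exact absurd hjcut (by simp)
        · exact hsat j h hjcut
    | false =>
      obtain ⟨hi0, hi1, hiR⟩ := hcond (by rw [hcut])
      have hiNat : i.toNat < vis.length := by omega
      have hget : PySem.List.pyGet? vis i = vis[i.toNat]? := PySem.List.pyGet?_of_nonneg _ hi0
      cases hvi : vis[i.toNat]? with
      | none => rw [List.getElem?_eq_none_iff] at hvi; omega
      | some b =>
        cases b with
        | true =>
          obtain ⟨vis', δ, hfA, hfB, hl, hcnt, hsub, hle, hsat⟩ := ih ihH vis hlen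
          refine ⟨vis', δ, ?_, ?_, hl, hcnt, hsub, hle, ?_⟩
          · intro add cnt
            simp only [List.foldl_cons, hstepA, hget, hvi]
            exact hfA add cnt
          · intro comp ch
            simp only [pvScanNbrs, hd2, hcut, if_neg (Bool.false_ne_true), hget, hvi]
            exact hfB comp ch
          · intro j hj hjcut
            rcases List.mem_cons.mp hj with h | h
            · subst h
              rw [PySem.List.pyGet?_of_nonneg _ hi0]
              exact hle _ hvi
            · exact hsat j h hjcut
        | false =>
          have hviE : vis[i.toNat] = false := (List.getElem?_eq_some_iff.mp hvi).choose_spec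
          have hsetD : PySem.List.pySetD vis i true = vis.set i.toNat true :=
            PySem.List.pySetD_of_nonneg _ _ hi0
          have hlen1 : (vis.set i.toNat true).length = n := by rw [List.length_set]; exact hlen
          obtain ⟨vis', δ, hfA, hfB, hl, hcnt, hsub, hle, hsat⟩ := ih ihH (vis.set i.toNat true) hlen1
          have hle' : pvLe vis vis' := pvLe_trans (pvLe_set vis i.toNat) hle
          refine ⟨vis', i :: δ, ?_, ?_, hl, ?_, ?_, hle', ?_⟩
          · intro add cnt
            simp only [List.foldl_cons, hstepA, hget, hvi, Bool.false_eq_true, if_false, hsetD]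
            rw [hfA (add ++ [i]) (cnt + 1)]
            simp only [List.length_cons, Prod.mk.injEq]
            refine ⟨by simp, by simp, by push_cast; ring⟩
          · intro comp ch
            simp only [pvScanNbrs, hd2, hcut, if_neg (Bool.false_ne_true), hget, hvi, hsetD]
            rw [hfB (comp ++ [i]) true]
            simp
          · have := pvCountSetFalse vis i.toNat hiNat hviE
            simp only [List.length_cons]; omega
          · intro j hj
            rcases List.mem_cons.mp hj with h | h
            · subst h; exact hiR
            · exact hsub j h
          · intro j hj hjcut
            rcases List.mem_cons.mp hj with h | h
            · subst h
              rw [PySem.List.pyGet?_of_nonneg _ hi0]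
              refine hle _ ?_
              simp [List.getElem?_set, hiNat]
            · exact hsat j h hjcut

-- the level step as A's loop body performs it per node
def pvLevelStep (graph : List (Int × List Int)) (isCut : List (Int × List (Int × Bool)))
    (st : List Bool × List Int × Int) (v : Int) : List Bool × List Int × Int :=
  match List.lookup v graph with
  | none => st
  | some ns => ns.foldl (pvVisitA isCut v) st

-- ---- a whole list of nodes expanded: A's per-node folds and B's snapshot scan agree,
-- and every scanned node comes out saturated ----
theorem pvLevel (graph : List (Int × List Int)) (isCut : List (Int × List (Int × Bool)))
    (n : Nat) (R : List Int) (hOK : pvOK graph isCut n R) :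
    ∀ (cur : List Int) (vis : List Bool), (∀ v ∈ cur, v ∈ R) → vis.length = n →
    ∃ vis' δ, (∀ (add : List Int) (cnt : Int),
        cur.foldl (pvLevelStep graph isCut) (vis, add, cnt) = (vis', add ++ δ, cnt + δ.length))
      ∧ (∀ (comp : List Int) (ch : Bool),
        pvScanComp graph isCut vis comp ch cur = (vis', comp ++ δ, ch || !δ.isEmpty))
      ∧ vis'.length = n ∧ vis'.count false + δ.length = vis.count false ∧ (∀ i ∈ δ, i ∈ R)
      ∧ pvLe vis vis'
      ∧ (∀ v ∈ cur, pvSat graph isCut vis' v) := by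
  intro cur
  induction cur with
  | nil =>
    intro vis _ hlen
    exact ⟨vis, [], by intro add cnt; simp, by intro comp ch; simp [pvScanComp],
      hlen, by simp, by simp, pvLe_refl vis, by simp⟩
  | cons v rest ih =>
    intro vis hk hlen
    obtain ⟨hkey, hedges⟩ := hOK v (hk v (List.mem_cons_self ..))
    obtain ⟨ns, hns⟩ := Option.isSome_iff_exists.mp hkey
    have hH : ∀ i ∈ ns, (List.lookup i ((List.lookup v isCut).getD [])).isSome = true ∧
        (List.lookup i ((List.lookup v isCut).getD []) = some false →
          0 ≤ i ∧ i < (n : Int) ∧ i ∈ R) := by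
      intro i hi
      exact hedges i (by rw [hns, Option.getD_some]; exact hi)
    obtain ⟨vis1, δ1, hfA1, hfB1, hl1, hc1, hm1, hle1, hsat1⟩ := pvExpand isCut n R v ns hH vis hlen
    obtain ⟨vis', δ2, hfA2, hfB2, hl2, hc2, hm2, hle2, hsat2⟩ :=
      ih vis1 (fun w hw => hk w (List.mem_cons_of_mem _ hw)) hl1
    refine ⟨vis', δ1 ++ δ2, ?_, ?_, hl2, by simp; omega, ?_, pvLe_trans hle1 hle2, ?_⟩
    · intro add cnt
      simp only [List.foldl_cons, pvLevelStep, hns]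
      rw [hfA1 add cnt, hfA2 (add ++ δ1) (cnt + δ1.length)]
      simp; omega
    · intro comp ch
      simp only [pvScanComp, hns]
      rw [hfB1 comp ch, hfB2 (comp ++ δ1) (ch || !δ1.isEmpty)]
      cases δ1 <;> cases δ2 <;> cases ch <;> simp [List.append_assoc]
    · intro i hi
      rcases List.mem_append.mp hi with h | h
      · exact hm1 i h
      · exact hm2 i h
    · intro w hw
      rcases List.mem_cons.mp hw with h | h
      · subst h
        refine pvSat_mono graph isCut n R hOK w (hk w (List.mem_cons_self ..)) hle2 ?_
        intro i hi hicut
        rw [hns, Option.getD_some] at hi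
        exact hsat1 i hi hicut
      · exact hsat2 w h

-- ---- scanning saturated nodes is a no-op, so B may rescan the old component prefix ----
theorem pvScanNbrs_sat (isCut : List (Int × List (Int × Bool))) (v : Int) (vis : List Bool)
    (P : Int → Prop)
    (hP : ∀ i, P i → List.lookup i ((List.lookup v isCut).getD []) = some false →
        PySem.List.pyGet? vis i = some true) :
    ∀ (ns : List Int), (∀ i ∈ ns, P i) →
    ∀ (comp : List Int) (ch : Bool), pvScanNbrs isCut v vis comp ch ns = (vis, comp, ch) := by
  intro ns
  induction ns with
  | nil => intro _ comp ch; simp [pvScanNbrs]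
  | cons i rest ih =>
    intro hmem comp ch
    cases hd2 : List.lookup v isCut with
    | none => simp [pvScanNbrs, hd2]
    | some d =>
      cases hcut : List.lookup i d with
      | none => simp [pvScanNbrs, hd2, hcut]
      | some cut =>
        cases cut with
        | true =>
          simp only [pvScanNbrs, hd2, hcut, if_pos]
          exact ih (fun j hj => hmem j (List.mem_cons_of_mem _ hj)) comp ch
        | false =>
          have hvis : PySem.List.pyGet? vis i = some true := by
            refine hP i (hmem i (List.mem_cons_self ..)) ?_
            rw [hd2, Option.getD_some, hcut]
          simp only [pvScanNbrs, hd2, hcut, if_neg (Bool.false_ne_true), hvis]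
          exact ih (fun j hj => hmem j (List.mem_cons_of_mem _ hj)) comp ch

theorem pvScanComp_sat (graph : List (Int × List Int)) (isCut : List (Int × List (Int × Bool)))
    (n : Nat) (R : List Int) (hOK : pvOK graph isCut n R) (vis : List Bool) :
    ∀ (D : List Int), (∀ v ∈ D, v ∈ R) → (∀ v ∈ D, pvSat graph isCut vis v) →
    ∀ (comp : List Int) (ch : Bool) (F : List Int),
    pvScanComp graph isCut vis comp ch (D ++ F) = pvScanComp graph isCut vis comp ch F := by
  intro D
  induction D with
  | nil => intro _ _ comp ch F; simp
  | cons v rest ih =>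
    intro hR hsat comp ch F
    obtain ⟨ns, hns⟩ := Option.isSome_iff_exists.mp (hOK v (hR v (List.mem_cons_self ..))).1
    have hnbr := pvScanNbrs_sat isCut v vis (fun i => i ∈ (List.lookup v graph).getD [])
      (fun i hi hc => hsat v (List.mem_cons_self ..) i hi hc) ns
      (by intro i hi; rw [hns, Option.getD_some]; exact hi) comp ch
    simp only [List.cons_append, pvScanComp, hns, hnbr]
    exact ih (fun w hw => hR w (List.mem_cons_of_mem _ hw))
      (fun w hw => hsat w (List.mem_cons_of_mem _ hw)) comp ch F

-- helper: pvALoop on an empty frontier returns cnt whatever the fuel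
theorem pvALoop_nil (graph : List (Int × List Int)) (isCut : List (Int × List (Int × Bool)))
    (f : Nat) (vis : List Bool) (cnt : Int) : pvALoop graph isCut f vis [] cnt = cnt := by
  cases f <;> simp [pvALoop]

-- ---- A's queue at a level boundary is (rest of current level) ++ (next level so far):
-- processing the current level equals the level fold, consuming one fuel per node ----
theorem pvStep (graph : List (Int × List Int)) (isCut : List (Int × List (Int × Bool)))
    (n : Nat) (R : List Int) (hOK : pvOK graph isCut n R) :
    ∀ (cur : List Int) (f : Nat) (vis : List Bool) (nxt : List Int) (cnt : Int),
    (∀ v ∈ cur, v ∈ R) → (∀ v ∈ nxt, v ∈ R) → vis.length = n →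
    vis.count false + cur.length + nxt.length ≤ f →
    pvALoop graph isCut f vis (cur ++ nxt) cnt =
      (fun st => pvALoop graph isCut (f - cur.length) st.1 st.2.1 st.2.2)
        (cur.foldl (pvLevelStep graph isCut) (vis, nxt, cnt)) := by
  intro cur
  induction cur with
  | nil => intro f vis nxt cnt _ _ _ _; simp
  | cons v rest ih =>
    intro f vis nxt cnt hkc hkn hlen hfuel
    cases f with
    | zero => exfalso; simp only [List.length_cons] at hfuel; omega
    | succ f' =>
      obtain ⟨hkey, hedges⟩ := hOK v (hkc v (List.mem_cons_self ..))
      obtain ⟨ns, hns⟩ := Option.isSome_iff_exists.mp hkey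
      have hH : ∀ i ∈ ns, (List.lookup i ((List.lookup v isCut).getD [])).isSome = true ∧
          (List.lookup i ((List.lookup v isCut).getD []) = some false →
            0 ≤ i ∧ i < (n : Int) ∧ i ∈ R) := by
        intro i hi
        exact hedges i (by rw [hns, Option.getD_some]; exact hi)
      obtain ⟨vis1, δ, hfA, _, hl1, hc1, hm1, _, _⟩ := pvExpand isCut n R v ns hH vis hlen
      have lhs : pvALoop graph isCut (f' + 1) vis ((v :: rest) ++ nxt) cnt =
          pvALoop graph isCut f' vis1 (rest ++ (nxt ++ δ)) (cnt + δ.length) := by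
        simp only [List.cons_append, pvALoop, hns]
        rw [hfA [] cnt]
        simp [List.append_assoc]
      rw [lhs, ih f' vis1 (nxt ++ δ) (cnt + δ.length)
            (fun w hw => hkc w (List.mem_cons_of_mem _ hw))
            (fun w hw => (List.mem_append.mp hw).elim (hkn w) (hm1 w))
            hl1 (by simp at hfuel ⊢; omega)]
      have hrhs : (v :: rest).foldl (pvLevelStep graph isCut) (vis, nxt, cnt) =
          rest.foldl (pvLevelStep graph isCut) (vis1, nxt ++ δ, cnt + δ.length) := by
        simp only [List.foldl_cons, pvLevelStep, hns]
        rw [hfA nxt cnt]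
      rw [hrhs]
      simp only [List.length_cons, Nat.succ_sub_succ]

-- ---- the two loops agree: A at a level boundary with frontier F and count (D++F).length,
-- B about to rescan the whole component D++F, D already saturated ----
theorem pvLoops (graph : List (Int × List Int)) (isCut : List (Int × List (Int × Bool)))
    (n : Nat) (R : List Int) (hOK : pvOK graph isCut n R) :
    ∀ (fB fA : Nat) (vis : List Bool) (D F : List Int) (cnt : Int),
    (∀ v ∈ D, v ∈ R) → (∀ v ∈ F, v ∈ R) → (∀ v ∈ D, pvSat graph isCut vis v) →
    vis.length = n → cnt = ((D ++ F).length : Int) →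
    vis.count false + F.length ≤ fA → vis.count false < fB →
    pvALoop graph isCut fA vis F cnt = pvBLoop graph isCut fB vis (D ++ F) := by
  intro fB
  induction fB with
  | zero => intro fA vis D F cnt _ _ _ _ _ _ h; omega
  | succ g ih =>
    intro fA vis D F cnt hD hF hDsat hlen hcnt hfA hfB
    obtain ⟨vis', δ, hfA1, hfB1, hl, hc, hm, hle, hsatF⟩ := pvLevel graph isCut n R hOK F vis hF hlen
    have hstepA := pvStep graph isCut n R hOK F fA vis [] cnt hF (by simp) hlen
      (by simpa using hfA)
    simp only [List.append_nil] at hstepA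
    rw [hstepA, hfA1 [] cnt]
    have hscan : pvScanComp graph isCut vis (D ++ F) false (D ++ F) =
        (vis', (D ++ F) ++ δ, !δ.isEmpty) := by
      rw [pvScanComp_sat graph isCut n R hOK vis D hD hDsat (D ++ F) false F, hfB1 (D ++ F) false]
      simp
    simp only [pvBLoop, hscan]
    cases δ with
    | nil =>
      simp only [List.isEmpty_nil, Bool.not_true, if_neg (Bool.false_ne_true), List.append_nil,
        List.nil_append, List.length_nil, Nat.cast_zero, add_zero]
      rw [pvALoop_nil, hcnt]
    | cons x xs =>
      simp only [List.isEmpty_cons, Bool.not_false, if_pos]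
      have hsatDF : ∀ v ∈ D ++ F, pvSat graph isCut vis' v := by
        intro w hw
        rcases List.mem_append.mp hw with h | h
        · exact pvSat_mono graph isCut n R hOK w (hD w h) hle (hDsat w h)
        · exact hsatF w h
      have := ih (fA - F.length) vis' (D ++ F) (x :: xs) (cnt + (x :: xs).length)
        (fun w hw => (List.mem_append.mp hw).elim (hD w) (hF w)) hm hsatDF hl
        (by rw [hcnt]; push_cast; simp; ring)
        (by simp at hc ⊢; omega) (by simp at hc ⊢; omega)
      simp only [List.nil_append] at this ⊢
      rw [this, List.append_assoc]

-- ===== VERDICT (by name: the statement is the Claim_ definition above) =====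
theorem bfs_spec : Claim_equal_bfs := by
  intro start graph visited isCut _hDom hPre
  have hOK := pvPre_OK start graph visited isCut hPre
  obtain ⟨h0, h1, _⟩ := hPre
  unfold Spec_bfs bfs bfs_alt
  have hin : PySem.Raise.InRange visited.length start := by
    simp [PySem.Raise.InRange]; omega
  cases hset : PySem.List.pySet? visited start true with
  | none => exact absurd ((PySem.List.pySet?_eq_none_iff _ _ _).mp hset) (by simp [hin])
  | some vis0 =>
    have hvis0 : vis0 = visited.set start.toNat true := by
      have := PySem.List.pySetD_of_nonneg visited true h0
      simp only [PySem.List.pySetD, hset, Option.getD_some] at this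
      exact this
    have hlen0 : vis0.length = visited.length := by rw [hvis0, List.length_set]
    have := pvLoops graph isCut visited.length (pvReach graph isCut visited.length start) hOK
      (visited.length + 1) (visited.length + 1) vis0 [] [start] 1
      (by simp)
      (by intro w hw; simp at hw; subst hw; exact pvStart_mem_reach ..)
      (by simp)
      hlen0 (by simp)
      (by have := List.count_le_length (a := false) (l := vis0); simp; omega)
      (by have := List.count_le_length (a := false) (l := vis0); omega)
    simpa using this
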